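-- pv_equiv track=rewrite | github.com/MartialRoberge/anapath-dictee | scripts/ingest_modeles_cr.py | extract_section_conclusion
-- ===== SOURCE A (Python) =====
-- SECTION_HEADERS_CONCLUSION: list[str] = [
--     "CONCLUSION :", "CONCLUSION:", "CONCLUSION",
-- ]
--
-- def extract_section_conclusion(paragraphs: list[str]) -> str:
--     """Extrait le bloc conclusion : tout ce qui suit l'entete 'CONCLUSION'."""
--     conclusion_parts: list[str] = []
--     in_conclusion: bool = False
--
--     for para in paragraphs:
--         if not in_conclusion:
--             if any(para.upper().startswith(h) for h in SECTION_HEADERS_CONCLUSION):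
--                 in_conclusion = True
--             continue
--         conclusion_parts.append(para)
--
--     return "\n".join(conclusion_parts)
-- ===== SOURCE B (Python) =====
-- def extract_section_conclusion(paragraphs: list[str]) -> str:
--     """Extrait le bloc conclusion : tout ce qui suit l'entete 'CONCLUSION'."""
--     idx = next((i for i, para in enumerate(paragraphs)
--                 if para.upper().startswith("CONCLUSION")), None)
--     if idx is None:
--         return ""
--     return "\n".join(paragraphs[idx + 1:])
-- ===== Notes on version B (the rewrite author's own statement) =====
-- stated objective: simpler
-- what changed: Replaces the boolean-flag accumulation loop by locating the first 'CONCLUSION' header index with next/enumerate and joining the tail slice paragraphs[idx+1:], collapsing the three-header any() into one startswith('CONCLUSION').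
import Mathlib
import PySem

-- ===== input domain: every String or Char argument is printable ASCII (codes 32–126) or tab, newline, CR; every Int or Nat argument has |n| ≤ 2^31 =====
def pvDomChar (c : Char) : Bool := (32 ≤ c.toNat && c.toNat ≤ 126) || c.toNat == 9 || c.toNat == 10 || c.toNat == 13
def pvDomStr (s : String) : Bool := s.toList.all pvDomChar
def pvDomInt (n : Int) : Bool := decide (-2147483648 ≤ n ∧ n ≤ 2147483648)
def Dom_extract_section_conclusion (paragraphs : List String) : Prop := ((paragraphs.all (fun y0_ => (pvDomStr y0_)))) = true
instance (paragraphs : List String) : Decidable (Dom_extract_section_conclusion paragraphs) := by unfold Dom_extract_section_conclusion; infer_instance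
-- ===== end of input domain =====

-- ===== PORT A =====
-- B differs from A by locating the header index and joining a tail slice (simpler decomposition).
def SECTION_HEADERS_CONCLUSION : List String := ["CONCLUSION :", "CONCLUSION:", "CONCLUSION"]

def extract_section_conclusion (paragraphs : List String) : String :=
  let st := paragraphs.foldl
    (fun (st : List String × Bool) para =>
      if !st.2 then
        if SECTION_HEADERS_CONCLUSION.any
            (fun h => PySem.Str.startswith (PySem.Str.upper para) h) then
          (st.1, true)
        else st
      else (st.1 ++ [para], st.2))
    ([], false)
  PySem.Str.join "\n" st.1

-- ===== PORT B =====
-- index of the first paragraph whose upper() starts with "CONCLUSION" (Python's next(... enumerate ...))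
def concIdx_alt : List String → Option Nat
  | [] => none
  | para :: rest =>
    if PySem.Str.startswith (PySem.Str.upper para) "CONCLUSION" then some 0
    else (concIdx_alt rest).map (· + 1)

def extract_section_conclusion_alt (paragraphs : List String) : String :=
  match concIdx_alt paragraphs with
  | none => ""
  | some i => PySem.Str.join "\n" (PySem.List.slice paragraphs (some ((i : Int) + 1)) none)

-- ===== PRECONDITION & SPEC =====
def Spec_extract_section_conclusion (paragraphs : List String) (out : String) : Prop := out = extract_section_conclusion_alt paragraphs
instance (paragraphs : List String) (out : String) : Decidable (Spec_extract_section_conclusion paragraphs out) := by unfold Spec_extract_section_conclusion; infer_instance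

-- ===== CLAIM (what is proved, stated in full; the proofs are below) =====
def Claim_equal_extract_section_conclusion : Prop := ∀ (paragraphs : List String), Dom_extract_section_conclusion paragraphs → Spec_extract_section_conclusion paragraphs (extract_section_conclusion paragraphs)

-- ===== LEMMAS AND PROOFS =====

-- proof-local name for A's loop body (definitionally the lambda in the port)
def astep (st : List String × Bool) (para : String) : List String × Bool :=
  if !st.2 then
    if SECTION_HEADERS_CONCLUSION.any
        (fun h => PySem.Str.startswith (PySem.Str.upper para) h) then
      (st.1, true)
    else st
  else (st.1 ++ [para], st.2)

theorem fold_eq (l : List String) (init : List String × Bool) :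
    l.foldl (fun (st : List String × Bool) para =>
      if !st.2 then
        if SECTION_HEADERS_CONCLUSION.any
            (fun h => PySem.Str.startswith (PySem.Str.upper para) h) then
          (st.1, true)
        else st
      else (st.1 ++ [para], st.2)) init = l.foldl astep init := rfl

-- the three headers all begin with "CONCLUSION", so the any() collapses
theorem hdr_conclusion_of (s t : String) (ht : "CONCLUSION".toList <+: t.toList)
    (hc : PySem.Str.startswith (PySem.Str.upper s) t = true) :
    PySem.Str.startswith (PySem.Str.upper s) "CONCLUSION" = true := by
  simp only [PySem.Str.startswith] at hc ⊢
  exact (PySem.Chars.startswith_iff _ _).2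
    (ht.trans ((PySem.Chars.startswith_iff _ _).1 hc))

theorem hdr_any (s : String) :
    SECTION_HEADERS_CONCLUSION.any
      (fun h => PySem.Str.startswith (PySem.Str.upper s) h)
      = PySem.Str.startswith (PySem.Str.upper s) "CONCLUSION" := by
  simp only [SECTION_HEADERS_CONCLUSION, List.any_cons, List.any_nil, Bool.or_false]
  cases h3 : PySem.Str.startswith (PySem.Str.upper s) "CONCLUSION" with
  | true => simp
  | false =>
    have f1 : PySem.Str.startswith (PySem.Str.upper s) "CONCLUSION :" = false := by
      cases hc : PySem.Str.startswith (PySem.Str.upper s) "CONCLUSION :" with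
      | false => rfl
      | true => exact absurd (hdr_conclusion_of s _ (by decide) hc) (by rw [h3]; exact Bool.false_ne_true)
    have f2 : PySem.Str.startswith (PySem.Str.upper s) "CONCLUSION:" = false := by
      cases hc : PySem.Str.startswith (PySem.Str.upper s) "CONCLUSION:" with
      | false => rfl
      | true => exact absurd (hdr_conclusion_of s _ (by decide) hc) (by rw [h3]; exact Bool.false_ne_true)
    rw [f1, f2]
    rfl

theorem astep_hit (acc : List String) (p : String)
    (h : PySem.Str.startswith (PySem.Str.upper p) "CONCLUSION" = true) :
    astep (acc, false) p = (acc, true) := by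
  unfold astep
  rw [hdr_any, h]
  simp

theorem astep_miss (acc : List String) (p : String)
    (h : PySem.Str.startswith (PySem.Str.upper p) "CONCLUSION" = false) :
    astep (acc, false) p = (acc, false) := by
  unfold astep
  rw [hdr_any, h]
  simp

theorem foldl_flag_true :
    ∀ (rest : List String) (acc : List String),
      rest.foldl astep (acc, true) = (acc ++ rest, true) := by
  intro rest
  induction rest with
  | nil => intro acc; simp
  | cons p t ih => intro acc; simp [List.foldl_cons, astep, ih]

theorem main_aux : ∀ l : List String,
    PySem.Str.join "\n" (l.foldl astep ([], false)).1
      = extract_section_conclusion_alt l := by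
  intro l
  induction l with
  | nil => rfl
  | cons p rest ih =>
    rw [List.foldl_cons]
    cases h : PySem.Str.startswith (PySem.Str.upper p) "CONCLUSION" with
    | true =>
      rw [astep_hit [] p h, foldl_flag_true rest []]
      simp only [extract_section_conclusion_alt, concIdx_alt, h, if_true]
      simp [PySem.List.slice_from_one]
    | false =>
      rw [astep_miss [] p h, ih]
      simp only [extract_section_conclusion_alt, concIdx_alt, h, Bool.false_eq_true, if_false]
      cases hc : concIdx_alt rest with
      | none => rfl
      | some i =>
        simp only [Option.map_some]
        have h1 : ((i : Int) + 1) = ((i + 1 : Nat) : Int) := by push_cast; ring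
        have h2 : (((i + 1 : Nat) : Int) + 1) = ((i + 2 : Nat) : Int) := by push_cast; ring
        rw [h1, h2, PySem.List.slice_from_natCast, PySem.List.slice_from_natCast]
        rfl

-- ===== VERDICT (by name: the statement is the Claim_ definition above) =====
theorem extract_section_conclusion_spec : Claim_equal_extract_section_conclusion := by
  intro paragraphs _
  unfold Spec_extract_section_conclusion extract_section_conclusion
  rw [fold_eq]
  exact main_aux paragraphs
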